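-- pv_equiv track=rewrite | github.com/theri6v/CodeSprintSolutions | GeekForGeek/Problem Of The Day/Circle of strings.py | isCircle
-- ===== SOURCE A (Python) =====
-- from collections import defaultdict, Counter
--
-- def isCircle(arr):
--     # code here
--     g = defaultdict(list)
--     indegree = Counter()
--     outdegree = Counter()
--     for s in arr:
--         g[s[0]].append(s[-1])
--         indegree[s[-1]]+=1
--         outdegree[s[0]] +=1
--     if indegree!=outdegree:
--         return 0
--
--     visited = set()
--
--     def dfs(n,g):
--         if n in visited:
--             return
--         visited.add(n)
--         for nbr in g[n]:
--             dfs(nbr,g)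
--
--     dfs(arr[0][0],g)
--     if len(visited)!=len(g):
--         return 0
--     return 1
-- ===== SOURCE B (Python) =====
-- from collections import Counter
--
-- def isCircle(arr):
--     indeg = Counter(s[-1] for s in arr)
--     outdeg = Counter(s[0] for s in arr)
--     if indeg != outdeg:
--         return 0
--     seen = {arr[0][0]}
--     while True:
--         new = {s[-1] for s in arr if s[0] in seen}
--         if new <= seen:
--             break
--         seen |= new
--     return 1 if all(c in seen for c in outdeg) else 0
-- ===== Notes on version B (the rewrite author's own statement) =====
-- stated objective: alternative
-- what changed: Replaces A's recursive DFS over a defaultdict adjacency list (whose key growth during traversal also encodes the connectivity test via len(g)) with a round-based reachability closure computed directly off the string list inside a while-True fixpoint loop, and checks connectivity as 'every outdegree key is reached'.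
import Mathlib
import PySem

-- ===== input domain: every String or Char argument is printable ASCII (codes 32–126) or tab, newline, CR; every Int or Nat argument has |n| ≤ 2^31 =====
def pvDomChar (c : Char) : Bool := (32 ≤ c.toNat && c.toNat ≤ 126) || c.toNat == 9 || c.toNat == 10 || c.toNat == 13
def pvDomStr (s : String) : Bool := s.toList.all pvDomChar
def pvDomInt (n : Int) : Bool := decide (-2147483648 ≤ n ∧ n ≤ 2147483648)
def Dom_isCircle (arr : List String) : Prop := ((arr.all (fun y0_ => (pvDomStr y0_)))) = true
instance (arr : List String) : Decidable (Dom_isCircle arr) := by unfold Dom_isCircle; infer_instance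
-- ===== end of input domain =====

-- B replaces A's recursive DFS + defaultdict-growth bookkeeping by a round-based
-- reachability closure over the edge list (no adjacency dict, no recursion); same
-- return value on every input A accepts (Pre_ excludes only inputs where A raises).

-- ===== PORT A =====
-- s[0] / s[-1]; equal to Python's indexing for s ≠ "" (Pre_ excludes empty strings,
-- where Python raises IndexError).
def pvFirst (s : String) : Char := s.toList.headD ' '
def pvLast (s : String) : Char := s.toList.getLastD ' '

-- Python dict/Counter '==': same key set and same value at every key (order-insensitive).
def pvCtrEq (a b : PySem.Dict Char Int) : Bool :=
  a.keys.all (fun k => b.contains k && (a.getD k 0 == b.getD k 0)) &&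
  b.keys.all (fun k => a.contains k)

-- A's recursive dfs; `g[n]` on the defaultdict creates the key n (with value [])
-- when absent, which is what makes len(g) grow.  fuel is a totality guard only:
-- 2*len(arr)+1 exceeds the recursion depth (each frame adds a fresh char to
-- visited before recursing; proved sufficient below via pvRem).
def pvDfsA (fuel : Nat) (n : Char)
    (st : PySem.Set Char × PySem.Dict Char (List Char)) :
    PySem.Set Char × PySem.Dict Char (List Char) :=
  match fuel with
  | 0 => st
  | fuel+1 =>
    if PySem.Set.contains st.1 n then st
    else
      let vis := PySem.Set.add st.1 n
      let g := if st.2.contains n then st.2 else st.2.insert n []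
      (g.getD n []).foldl (fun st2 nbr => pvDfsA fuel nbr st2) (vis, g)

def isCircle (arr : List String) : Int :=
  let acc := arr.foldl
    (fun (acc : PySem.Dict Char (List Char) × PySem.Dict Char Int × PySem.Dict Char Int) s =>
      (acc.1.modify (pvFirst s) [] (· ++ [pvLast s]),
       acc.2.1.modify (pvLast s) 0 (· + 1),
       acc.2.2.modify (pvFirst s) 0 (· + 1)))
    (PySem.Dict.empty, PySem.Dict.empty, PySem.Dict.empty)
  if !(pvCtrEq acc.2.1 acc.2.2) then 0
  else
    match arr with
    | [] => 0        -- Python raises IndexError at arr[0] here; outside Pre_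
    | s :: _ =>
      let r := pvDfsA (2 * arr.length + 1) (pvFirst s) (PySem.Set.empty, acc.1)
      if r.1.length ≠ r.2.size then 0 else 1

-- ===== PORT B =====
-- one round: {s[-1] for s in arr if s[0] in seen}
def pvRound (arr : List String) (seen : PySem.Set Char) : PySem.Set Char :=
  arr.foldl
    (fun acc t => if PySem.Set.contains seen (pvFirst t) then PySem.Set.add acc (pvLast t) else acc)
    PySem.Set.empty

-- the `while True` fixpoint loop; fuel is a totality guard only: every iteration
-- before the break adds a last-character to seen, so len(arr)+1 iterations suffice
-- (proved below).
def pvLoopB (fuel : Nat) (arr : List String) (seen : PySem.Set Char) : PySem.Set Char :=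
  match fuel with
  | 0 => seen
  | fuel+1 =>
    let new := pvRound arr seen
    if PySem.Set.issubset new seen then seen
    else pvLoopB fuel arr (PySem.Set.union seen new)

def isCircle_alt (arr : List String) : Int :=
  let indeg := PySem.Dict.counter (arr.map pvLast)
  let outdeg := PySem.Dict.counter (arr.map pvFirst)
  if !(pvCtrEq indeg outdeg) then 0
  else
    match arr with
    | [] => 0        -- Python raises IndexError at arr[0] here; outside Pre_
    | s :: _ =>
      let seen := pvLoopB (arr.length + 1) arr (PySem.Set.ofList [pvFirst s])
      if outdeg.keys.all (fun c => PySem.Set.contains seen c) then 1 else 0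

-- ===== PRECONDITION & SPEC =====
-- Pre_ excludes exactly the inputs where the Python A raises IndexError:
-- the empty list (arr[0]) and lists containing an empty string (s[0], s[-1]).
def Pre_isCircle (arr : List String) : Prop := arr ≠ [] ∧ ∀ s ∈ arr, s ≠ ""
instance (arr : List String) : Decidable (Pre_isCircle arr) := by unfold Pre_isCircle; infer_instance

def pvWitness_isCircle : List String := ["ab", "ba"]

def Spec_isCircle (arr : List String) (out : Int) : Prop := out = isCircle_alt arr
instance (arr : List String) (out : Int) : Decidable (Spec_isCircle arr out) := by unfold Spec_isCircle; infer_instance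

-- ===== CLAIM (what is proved, stated in full; the proofs are below) =====
def Claim_equal_isCircle : Prop := ∀ (arr : List String), Dom_isCircle arr → Pre_isCircle arr → Spec_isCircle arr (isCircle arr)

-- ===== LEMMAS AND PROOFS =====

-- proof-side view of the graph: edges, adjacency lists, reachability, the universe
def pvEdges (arr : List String) : List (Char × Char) := arr.map (fun s => (pvFirst s, pvLast s))
def pvN (arr : List String) (c : Char) : List Char :=
  ((pvEdges arr).filter (fun p => p.1 == c)).map (·.2)
def pvEdge (arr : List String) (a b : Char) : Prop := (a, b) ∈ pvEdges arr
def pvReach (arr : List String) (a b : Char) : Prop := Relation.ReflTransGen (pvEdge arr) a b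
def pvU (arr : List String) : List Char := arr.map pvFirst ++ arr.map pvLast
def pvRem (arr : List String) (v : List Char) : Nat :=
  ((pvU arr).toFinset.filter (fun c => c ∉ v)).card
def pvRemB (arr : List String) (v : List Char) : Nat :=
  ((arr.map pvLast).toFinset.filter (fun c => c ∉ v)).card

-- a "good" set: contains the start, closed under the edges, and reach-sound
def pvGood (arr : List String) (start : Char) (S : List Char) : Prop :=
  start ∈ S ∧ (∀ t ∈ arr, pvFirst t ∈ S → pvLast t ∈ S) ∧ (∀ c ∈ S, pvReach arr start c)

lemma mem_pvN (arr : List String) (c m : Char) :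
    m ∈ pvN arr c ↔ pvEdge arr c m := by
  simp only [pvN, pvEdge, List.mem_map, List.mem_filter, beq_iff_eq]
  constructor
  · rintro ⟨⟨a, b⟩, ⟨hab, rfl⟩, rfl⟩
    simpa using hab
  · intro h
    exact ⟨(c, m), ⟨h, rfl⟩, rfl⟩

lemma pvN_subset_U (arr : List String) (c m : Char) (h : m ∈ pvN arr c) : m ∈ pvU arr := by
  rw [mem_pvN] at h
  simp only [pvEdge, pvEdges, List.mem_map] at h
  obtain ⟨s, hs, he⟩ := h
  simp [pvU, List.mem_append, List.mem_map]
  right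
  exact ⟨s, hs, (Prod.mk.injEq _ _ _ _ ▸ he).2⟩

lemma pvRem_mono (arr : List String) {v v' : List Char} (h : ∀ c ∈ v, c ∈ v') :
    pvRem arr v' ≤ pvRem arr v := by
  apply Finset.card_le_card
  intro c hc
  simp only [Finset.mem_filter] at hc ⊢
  exact ⟨hc.1, fun hm => hc.2 (h c hm)⟩

lemma pvRem_lt (arr : List String) {v : List Char} {n : Char}
    (hU : n ∈ pvU arr) (hv : n ∉ v) : pvRem arr (v ++ [n]) < pvRem arr v := by
  apply Finset.card_lt_card
  constructor
  · intro c hc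
    simp only [Finset.mem_filter, List.mem_append, List.mem_singleton] at hc ⊢
    exact ⟨hc.1, fun hm => hc.2 (Or.inl hm)⟩
  · intro hsub
    have := hsub (by simp [Finset.mem_filter, List.mem_toFinset, hU, hv] : n ∈ _)
    simp [Finset.mem_filter] at this

lemma mem_pvRound_aux (arr : List String) (seen : PySem.Set Char) (y : Char) :
    ∀ (l : List String) (acc : PySem.Set Char),
    y ∈ l.foldl (fun acc t => if PySem.Set.contains seen (pvFirst t) then PySem.Set.add acc (pvLast t) else acc) acc
      ↔ y ∈ acc ∨ ∃ t ∈ l, pvFirst t ∈ seen ∧ y = pvLast t := by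
  intro l
  induction l with
  | nil => simp
  | cons t l ih =>
    intro acc
    simp only [List.foldl_cons, ih]
    by_cases h : pvFirst t ∈ seen
    · rw [if_pos ((PySem.Set.contains_iff seen (pvFirst t)).mpr h)]
      simp only [PySem.Set.mem_add]
      constructor
      · rintro (((h1|h1)|h1))
        · exact Or.inl h1
        · exact Or.inr ⟨t, by simp, h, h1⟩
        · obtain ⟨u, hu, h2, h3⟩ := h1
          exact Or.inr ⟨u, by simp [hu], h2, h3⟩
      · rintro (h1 | ⟨u, hu, h2, h3⟩)
        · exact Or.inl (Or.inl h1)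
        · rcases List.mem_cons.mp hu with rfl | hu
          · exact Or.inl (Or.inr h3)
          · exact Or.inr ⟨u, hu, h2, h3⟩
    · have hc : PySem.Set.contains seen (pvFirst t) = false := by
        rcases Bool.eq_false_or_eq_true (PySem.Set.contains seen (pvFirst t)) with h' | h'
        · exact absurd ((PySem.Set.contains_iff seen (pvFirst t)).mp h') h
        · exact h'
      rw [if_neg (by rw [hc]; exact Bool.false_ne_true)]
      constructor
      · rintro (h1 | ⟨u, hu, h2, h3⟩)
        · exact Or.inl h1
        · exact Or.inr ⟨u, by simp [hu], h2, h3⟩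
      · rintro (h1 | ⟨u, hu, h2, h3⟩)
        · exact Or.inl h1
        · rcases List.mem_cons.mp hu with rfl | hu
          · exact absurd h2 h
          · exact Or.inr ⟨u, hu, h2, h3⟩

lemma mem_pvRound (arr : List String) (seen : PySem.Set Char) (y : Char) :
    y ∈ pvRound arr seen ↔ ∃ t ∈ arr, pvFirst t ∈ seen ∧ y = pvLast t := by
  rw [pvRound, mem_pvRound_aux arr seen y arr PySem.Set.empty]
  simp [PySem.Set.empty]

lemma pvLoopB_spec (arr : List String) (start : Char) : ∀ fuel (seen : PySem.Set Char),
    pvRemB arr seen < fuel → seen.Nodup →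
    (∀ c ∈ seen, pvReach arr start c) →
    (∀ c ∈ seen, c ∈ pvLoopB fuel arr seen) ∧
      (∀ c ∈ pvLoopB fuel arr seen, pvReach arr start c) ∧
      (∀ t ∈ arr, pvFirst t ∈ pvLoopB fuel arr seen → pvLast t ∈ pvLoopB fuel arr seen) := by
  intro fuel
  induction fuel with
  | zero => intro seen h; omega
  | succ fuel ih =>
    intro seen hrem hnd hsound
    rw [pvLoopB]
    by_cases hsub : PySem.Set.issubset (pvRound arr seen) seen = true
    · rw [if_pos hsub]
      refine ⟨fun c hc => hc, hsound, ?_⟩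
      intro t ht hf
      have := (PySem.Set.issubset_iff _ _).mp hsub (pvLast t)
        ((mem_pvRound arr seen (pvLast t)).mpr ⟨t, ht, hf, rfl⟩)
      exact this
    · rw [if_neg hsub]
      -- some element of the round is new
      obtain ⟨y, hy, hyn⟩ : ∃ y ∈ pvRound arr seen, y ∉ seen := by
        by_contra hco
        push_neg at hco
        exact hsub ((PySem.Set.issubset_iff _ _).mpr hco)
      obtain ⟨t, ht, htf, rfl⟩ := (mem_pvRound arr seen _).mp hy
      have hlt : pvRemB arr (PySem.Set.union seen (pvRound arr seen)) < pvRemB arr seen := by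
        apply Finset.card_lt_card
        constructor
        · intro c hc
          simp only [Finset.mem_filter] at hc ⊢
          exact ⟨hc.1, fun hm => hc.2 ((PySem.Set.mem_union _ _ _).mpr (Or.inl hm))⟩
        · intro hsub2
          have hmem : pvLast t ∈ (arr.map pvLast).toFinset.filter (fun c => c ∉ seen) := by
            simp only [Finset.mem_filter, List.mem_toFinset]
            exact ⟨List.mem_map_of_mem ht, hyn⟩
          have := hsub2 hmem
          simp only [Finset.mem_filter] at this
          exact this.2 ((PySem.Set.mem_union _ _ _).mpr (Or.inr hy))
      have hres := ih (PySem.Set.union seen (pvRound arr seen)) (by omega)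
        (PySem.Set.nodup_union _ _ hnd)
        (by
          intro c hc
          rcases (PySem.Set.mem_union _ _ _).mp hc with h1 | h1
          · exact hsound c h1
          · obtain ⟨u, hu, huf, rfl⟩ := (mem_pvRound arr seen _).mp h1
            exact Relation.ReflTransGen.tail (hsound _ huf)
              (by exact List.mem_map_of_mem hu))
      refine ⟨fun c hc => hres.1 c ((PySem.Set.mem_union _ _ _).mpr (Or.inl hc)), hres.2.1, hres.2.2⟩

lemma pvGood_mem_iff (arr : List String) (start : Char) {S T : List Char}
    (hS : pvGood arr start S) (hT : pvGood arr start T) (c : Char) : c ∈ S ↔ c ∈ T := by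
  obtain ⟨hS1, hS2, hS3⟩ := hS
  obtain ⟨hT1, hT2, hT3⟩ := hT
  have key : ∀ (W : List Char), start ∈ W → (∀ t ∈ arr, pvFirst t ∈ W → pvLast t ∈ W) →
      ∀ d, pvReach arr start d → d ∈ W := by
    intro W hW1 hW2 d hd
    induction hd with
    | refl => exact hW1
    | tail _ he ih =>
      obtain ⟨u, hu, hue⟩ := List.mem_map.mp he
      cases hue
      exact hW2 u hu ih
  exact ⟨fun h => key T hT1 hT2 c (hS3 c h), fun h => key S hS1 hS2 c (hT3 c h)⟩

-- the conclusions of the dfs invariant, for a call returning r from visited set v over graph keys gk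
def pvInv (arr : List String) (v : List Char) (gk : List Char)
    (r : PySem.Set Char × PySem.Dict Char (List Char)) : Prop :=
  v <+: r.1 ∧ r.1.Nodup ∧
  (∀ c, r.2.getD c [] = pvN arr c) ∧ r.2.keys.Nodup ∧
  (∀ c ∈ gk, c ∈ r.2.keys) ∧
  (∀ c ∈ r.2.keys, c ∈ gk ∨ c ∈ r.1) ∧
  (∀ c ∈ r.1, c ∈ v ∨ c ∈ r.2.keys) ∧
  (∀ c ∈ r.1, c ∈ v ∨ c ∈ pvU arr) ∧
  (∀ c ∈ r.1, c ∉ v → ∀ m ∈ pvN arr c, m ∈ r.1)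

lemma pvDfsA_spec (arr : List String) : ∀ fuel n (v : PySem.Set Char) g,
    pvRem arr v < fuel → n ∈ pvU arr → v.Nodup →
    (∀ c, g.getD c [] = pvN arr c) → g.keys.Nodup →
    pvInv arr v g.keys (pvDfsA fuel n (v, g)) ∧ n ∈ (pvDfsA fuel n (v, g)).1 ∧
      (∀ c ∈ (pvDfsA fuel n (v, g)).1, c ∉ v → pvReach arr n c) := by
  intro fuel
  induction fuel with
  | zero => intro n v g h; omega
  | succ fuel IH =>
    -- the fold over a neighbour list
    have hfold : ∀ (l : List Char) (v : PySem.Set Char) g, (∀ m ∈ l, m ∈ pvU arr) →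
        pvRem arr v < fuel → v.Nodup → (∀ c, g.getD c [] = pvN arr c) → g.keys.Nodup →
        pvInv arr v g.keys (l.foldl (fun st2 m => pvDfsA fuel m st2) (v, g)) ∧
          (∀ m ∈ l, m ∈ (l.foldl (fun st2 m => pvDfsA fuel m st2) (v, g)).1) ∧
          (∀ c ∈ (l.foldl (fun st2 m => pvDfsA fuel m st2) (v, g)).1, c ∉ v →
            ∃ m ∈ l, pvReach arr m c) := by
      intro l
      induction l with
      | nil =>
        intro v g hl hrem hnd hg hk
        refine ⟨⟨List.prefix_refl _, hnd, hg, hk, fun c h => h, fun c h => Or.inl h,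
          fun c h => Or.inl h, fun c h => Or.inl h, fun c h hcv => absurd h hcv⟩,
          by simp, fun c h hcv => absurd h hcv⟩
      | cons m l ihl =>
        intro v g hl hrem hnd hg hk
        have hC := IH m v g hrem (hl m (by simp)) hnd hg hk
        obtain ⟨⟨hpre1, hnd1, hg1, hk1, hkm1, hkf1, hvk1, hvu1, hcl1⟩, hmem1, hsnd1⟩ := hC
        set r1 := pvDfsA fuel m (v, g) with hr1
        have hrem1 : pvRem arr r1.1 < fuel :=
          lt_of_le_of_lt (pvRem_mono arr (fun c hc => hpre1.subset hc)) hrem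
        have hF := ihl r1.1 r1.2 (fun m' hm' => hl m' (by simp [hm'])) hrem1 hnd1 hg1 hk1
        obtain ⟨⟨hpre2, hnd2, hg2, hk2, hkm2, hkf2, hvk2, hvu2, hcl2⟩, hmem2, hsnd2⟩ := hF
        have hfold_eq : (m :: l).foldl (fun st2 m => pvDfsA fuel m st2) (v, g)
            = l.foldl (fun st2 m => pvDfsA fuel m st2) (r1.1, r1.2) := by
          simp [List.foldl_cons, hr1]
        rw [hfold_eq]
        set r := l.foldl (fun st2 m => pvDfsA fuel m st2) (r1.1, r1.2) with hr
        refine ⟨⟨hpre1.trans hpre2, hnd2, hg2, hk2,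
          fun c hc => hkm2 c (hkm1 c hc), ?_, ?_, ?_, ?_⟩, ?_, ?_⟩
        · intro c hc
          rcases hkf2 c hc with h | h
          · rcases hkf1 c h with h' | h'
            · exact Or.inl h'
            · exact Or.inr (hpre2.subset h')
          · exact Or.inr h
        · intro c hc
          rcases hvk2 c hc with h | h
          · rcases hvk1 c h with h' | h'
            · exact Or.inl h'
            · exact Or.inr (hkm2 c h')
          · exact Or.inr h
        · intro c hc
          rcases hvu2 c hc with h | h
          · exact hvu1 c h
          · exact Or.inr h
        · intro c hc hcv
          by_cases hcr1 : c ∈ r1.1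
          · intro m' hm'
            exact hpre2.subset (hcl1 c hcr1 hcv m' hm')
          · exact hcl2 c hc hcr1
        · intro m' hm'
          rcases List.mem_cons.mp hm' with rfl | hm'
          · exact hpre2.subset (hmem1)
          · exact hmem2 m' hm'
        · intro c hc hcv
          by_cases hcr1 : c ∈ r1.1
          · exact ⟨m, by simp, hsnd1 c hcr1 hcv⟩
          · obtain ⟨m', hm', hre⟩ := hsnd2 c hc hcr1
            exact ⟨m', by simp [hm'], hre⟩
    -- the main body at fuel+1
    intro n v g hrem hU hnd hg hk
    by_cases hc : PySem.Set.contains v n = true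
    · have heq : pvDfsA (fuel+1) n (v, g) = (v, g) := by
        rw [pvDfsA, if_pos hc]
      rw [heq]
      exact ⟨⟨List.prefix_refl _, hnd, hg, hk, fun c h => h, fun c h => Or.inl h,
        fun c h => Or.inl h, fun c h => Or.inl h, fun c h hcv => absurd h hcv⟩,
        (PySem.Set.contains_iff v n).mp hc,
        fun c h hcv => absurd h hcv⟩
    · have hnin : n ∉ v := fun h => hc ((PySem.Set.contains_iff v n).mpr h)
      have hcb : PySem.Set.contains v n = false := by
        rcases Bool.eq_false_or_eq_true (PySem.Set.contains v n) with h | h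
        · exact absurd h hc
        · exact h
      have hv1 : PySem.Set.add v n = v ++ [n] := PySem.Set.add_of_not_mem hnin
      set g1 := if g.contains n then g else g.insert n [] with hg1def
      have hg1 : ∀ c, g1.getD c [] = pvN arr c := by
        intro c
        rw [hg1def]
        by_cases hgc : g.contains n = true
        · rw [if_pos hgc]; exact hg c
        · have hgcb : g.contains n = false := by
            rcases Bool.eq_false_or_eq_true (g.contains n) with h | h
            · exact absurd h hgc
            · exact h
          rw [if_neg (by simp [hgcb])]
          rw [PySem.Dict.getD_insert]
          by_cases hcn : c = n
          · subst hcn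
            rw [if_pos rfl]
            have := hg c
            rw [PySem.Dict.getD_of_not_contains g [] hgcb] at this
            exact this
          · rw [if_neg hcn]; exact hg c
      have hk1 : g1.keys.Nodup := by
        rw [hg1def]; split
        · exact hk
        · exact PySem.Dict.nodup_keys_insert g n [] hk
      have hkeys1 : ∀ c ∈ g.keys, c ∈ g1.keys := by
        intro c hcg
        rw [hg1def]; split
        · exact hcg
        · next h =>
          rw [PySem.Dict.keys_insert_of_not_contains g []
            (by rcases Bool.eq_false_or_eq_true (g.contains n) with h' | h' <;> simp_all)]
          simp [hcg]
      have hkeys1' : ∀ c ∈ g1.keys, c ∈ g.keys ∨ c = n := by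
        intro c hcg
        rw [hg1def] at hcg; revert hcg; split
        · exact fun h => Or.inl h
        · next h =>
          rw [PySem.Dict.keys_insert_of_not_contains g []
            (by rcases Bool.eq_false_or_eq_true (g.contains n) with h' | h' <;> simp_all)]
          intro hm
          rcases List.mem_append.mp hm with h' | h'
          · exact Or.inl h'
          · exact Or.inr (by simpa using h')
      have hng1 : n ∈ g1.keys := by
        rw [hg1def]; split
        · next h => exact (PySem.Dict.contains_iff_mem_keys g n).mp h
        · next h =>
          rw [PySem.Dict.keys_insert_of_not_contains g []
            (by rcases Bool.eq_false_or_eq_true (g.contains n) with h' | h' <;> simp_all)]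
          simp
      have heq : pvDfsA (fuel+1) n (v, g)
          = (g1.getD n []).foldl (fun st2 m => pvDfsA fuel m st2) (PySem.Set.add v n, g1) := by
        rw [pvDfsA, if_neg (by rw [hcb]; exact Bool.false_ne_true)]
      have hrem1 : pvRem arr (PySem.Set.add v n) < fuel := by
        rw [hv1]
        have h1 := pvRem_lt arr hU hnin
        omega
      have hnd1 : (PySem.Set.add v n).Nodup := PySem.Set.nodup_add v n hnd
      have hlU : ∀ m ∈ g1.getD n [], m ∈ pvU arr := by
        intro m hm
        rw [hg1 n] at hm
        exact pvN_subset_U arr n m hm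
      have hF := hfold (g1.getD n []) (PySem.Set.add v n) g1 hlU hrem1 hnd1 hg1 hk1
      rw [heq]
      obtain ⟨⟨hpre2, hnd2, hg2, hk2, hkm2, hkf2, hvk2, hvu2, hcl2⟩, hmem2, hsnd2⟩ := hF
      set r := (g1.getD n []).foldl (fun st2 m => pvDfsA fuel m st2) (PySem.Set.add v n, g1) with hrdef
      have hvpre : v <+: (PySem.Set.add v n : List Char) := by rw [hv1]; exact ⟨[n], rfl⟩
      have hnv1 : n ∈ (PySem.Set.add v n : List Char) := by rw [hv1]; simp
      have hmemv1 : ∀ c, c ∈ (PySem.Set.add v n : List Char) → c ∈ v ∨ c = n := by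
        intro c hc; rw [hv1] at hc
        rcases List.mem_append.mp hc with h | h
        · exact Or.inl h
        · exact Or.inr (by simpa using h)
      refine ⟨⟨hvpre.trans hpre2, hnd2, hg2, hk2,
        fun c hcg => hkm2 c (hkeys1 c hcg), ?_, ?_, ?_, ?_⟩,
        hpre2.subset hnv1, ?_⟩
      · intro c hcg
        rcases hkf2 c hcg with h | h
        · rcases hkeys1' c h with h' | h'
          · exact Or.inl h'
          · subst h'; exact Or.inr (hpre2.subset hnv1)
        · exact Or.inr h
      · intro c hcr
        rcases hvk2 c hcr with h | h
        · rcases hmemv1 c h with h' | h'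
          · exact Or.inl h'
          · subst h'; exact Or.inr (hkm2 c hng1)
        · exact Or.inr h
      · intro c hcr
        rcases hvu2 c hcr with h | h
        · rcases hmemv1 c h with h' | h'
          · exact Or.inl h'
          · subst h'; exact Or.inr hU
        · exact Or.inr h
      · intro c hcr hcv
        by_cases hcn : c = n
        · subst hcn
          intro m hm
          rw [← hg1 c] at hm
          exact hmem2 m hm
        · refine hcl2 c hcr ?_
          intro hcv1
          rcases hmemv1 c hcv1 with h | h
          · exact hcv h
          · exact hcn h
      · intro c hcr hcv
        by_cases hcn : c = n
        · subst hcn; exact Relation.ReflTransGen.refl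
        · have hcv1 : c ∉ (PySem.Set.add v n : List Char) := by
            intro hcv1
            rcases hmemv1 c hcv1 with h | h
            · exact hcv h
            · exact hcn h
          obtain ⟨m, hm, hre⟩ := hsnd2 c hcr hcv1
          rw [hg1 n] at hm
          exact Relation.ReflTransGen.head ((mem_pvN arr n m).mp hm) hre

-- A's combined fold splits into three independent folds
lemma pvFold3 (arr : List String) :
    ∀ (a : PySem.Dict Char (List Char)) (b c : PySem.Dict Char Int),
    arr.foldl
      (fun (acc : PySem.Dict Char (List Char) × PySem.Dict Char Int × PySem.Dict Char Int) s =>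
        (acc.1.modify (pvFirst s) [] (· ++ [pvLast s]),
         acc.2.1.modify (pvLast s) 0 (· + 1),
         acc.2.2.modify (pvFirst s) 0 (· + 1)))
      (a, b, c)
    = (arr.foldl (fun d s => d.modify (pvFirst s) [] (· ++ [pvLast s])) a,
       arr.foldl (fun d s => d.modify (pvLast s) 0 (· + 1)) b,
       arr.foldl (fun d s => d.modify (pvFirst s) 0 (· + 1)) c) := by
  induction arr with
  | nil => intro a b c; rfl
  | cons s arr ih => intro a b c; simp only [List.foldl_cons, ih]

def pvG0 (arr : List String) : PySem.Dict Char (List Char) :=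
  arr.foldl (fun d s => d.modify (pvFirst s) [] (· ++ [pvLast s])) PySem.Dict.empty

lemma pvG0_getD (arr : List String) (c : Char) : (pvG0 arr).getD c [] = pvN arr c := by
  have hmap : pvG0 arr
      = (pvEdges arr).foldl (fun d p => d.modify p.1 [] (· ++ [p.2])) PySem.Dict.empty := by
    rw [pvEdges, List.foldl_map]
    rfl
  rw [hmap, PySem.Dict.getD_foldl_modify_append, PySem.Dict.getD_empty]
  rfl

lemma pvG0_keys (arr : List String) : (pvG0 arr).keys = PySem.Set.ofList (arr.map pvFirst) := by
  rw [pvG0]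
  rw [PySem.Dict.keys_foldl_modify_key arr pvFirst [] (fun _ s => (· ++ [pvLast s])) PySem.Dict.empty]
  rw [show (PySem.Dict.empty : PySem.Dict Char (List Char)).keys = [] from rfl]
  exact PySem.Set.update_nil_left _

-- the connectivity checks of the two ports agree
lemma pvChecks (arr : List String) (s : String) (rest : List String) (harr : arr = s :: rest) :
    (((pvDfsA (2 * arr.length + 1) (pvFirst s) (PySem.Set.empty, pvG0 arr)).1.length
        = (pvDfsA (2 * arr.length + 1) (pvFirst s) (PySem.Set.empty, pvG0 arr)).2.size)
      ↔ ((PySem.Dict.counter (arr.map pvFirst)).keys.all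
          (fun c => PySem.Set.contains (pvLoopB (arr.length + 1) arr (PySem.Set.ofList [pvFirst s])) c) = true)) := by
  have hstart : pvFirst s ∈ pvU arr := by
    rw [harr]; simp [pvU]
  -- A's dfs produces a good set
  have hrem0 : pvRem arr (PySem.Set.empty : PySem.Set Char) < 2 * arr.length + 1 := by
    have h1 : pvRem arr (PySem.Set.empty : PySem.Set Char) ≤ (pvU arr).toFinset.card :=
      Finset.card_filter_le _ _
    have h2 : (pvU arr).toFinset.card ≤ (pvU arr).length := List.toFinset_card_le _
    have h3 : (pvU arr).length = 2 * arr.length := by simp [pvU]; omega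
    omega
  have hA := pvDfsA_spec arr (2 * arr.length + 1) (pvFirst s) PySem.Set.empty (pvG0 arr)
    hrem0 hstart (by simp [PySem.Set.empty]) (pvG0_getD arr)
    (by rw [pvG0_keys]; exact PySem.Set.nodup_ofList _)
  set vis := (pvDfsA (2 * arr.length + 1) (pvFirst s) (PySem.Set.empty, pvG0 arr)).1 with hvisdef
  set gf := (pvDfsA (2 * arr.length + 1) (pvFirst s) (PySem.Set.empty, pvG0 arr)).2 with hgfdef
  obtain ⟨⟨hpre, hndv, hgD, hkn, hkm, hkf, hvk, hvu, hcl⟩, hstart_mem, hsound⟩ := hA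
  have hGoodA : pvGood arr (pvFirst s) vis := by
    refine ⟨hstart_mem, ?_, fun c hc => hsound c hc (List.not_mem_nil)⟩
    intro t ht hf
    exact hcl (pvFirst t) hf (List.not_mem_nil) (pvLast t)
      ((mem_pvN arr (pvFirst t) (pvLast t)).mpr (List.mem_map_of_mem ht))
  -- B's loop produces a good set
  have hremB : pvRemB arr (PySem.Set.ofList [pvFirst s]) < arr.length + 1 := by
    have h1 : pvRemB arr (PySem.Set.ofList [pvFirst s]) ≤ (arr.map pvLast).toFinset.card :=
      Finset.card_filter_le _ _
    have h2 : (arr.map pvLast).toFinset.card ≤ (arr.map pvLast).length := List.toFinset_card_le _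
    have h3 : (arr.map pvLast).length = arr.length := by simp
    omega
  have hB := pvLoopB_spec arr (pvFirst s) (arr.length + 1) (PySem.Set.ofList [pvFirst s])
    hremB (PySem.Set.nodup_ofList _)
    (by
      intro c hc
      have : c = pvFirst s := by simpa using (PySem.Set.mem_ofList _ c).mp hc
      subst this
      exact Relation.ReflTransGen.refl)
  set seen := pvLoopB (arr.length + 1) arr (PySem.Set.ofList [pvFirst s]) with hseendef
  obtain ⟨hBsub, hBsound, hBclosed⟩ := hB
  have hGoodB : pvGood arr (pvFirst s) seen :=
    ⟨hBsub (pvFirst s) ((PySem.Set.mem_ofList _ _).mpr (by simp)), hBclosed, hBsound⟩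
  have hmem : ∀ c, c ∈ vis ↔ c ∈ seen := pvGood_mem_iff arr (pvFirst s) hGoodA hGoodB
  -- the keys of the final graph are the sources plus the visited set
  have hkeys : ∀ c, c ∈ gf.keys ↔ (c ∈ arr.map pvFirst ∨ c ∈ vis) := by
    intro c
    constructor
    · intro h
      rcases hkf c h with h' | h'
      · rw [pvG0_keys] at h'
        exact Or.inl ((PySem.Set.mem_ofList _ c).mp h')
      · exact Or.inr h'
    · rintro (h | h)
      · exact hkm c (by rw [pvG0_keys]; exact (PySem.Set.mem_ofList _ c).mpr h)
      · rcases hvk c h with h' | h'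
        · exact absurd h' (List.not_mem_nil)
        · exact h'
  have hsize : gf.size = gf.keys.length := by simp [PySem.Dict.size, PySem.Dict.keys]
  have hvcard : vis.toFinset.card = vis.length := List.toFinset_card_of_nodup hndv
  have hkcard : gf.keys.toFinset.card = gf.keys.length := List.toFinset_card_of_nodup hkn
  have hKF : gf.keys.toFinset = (arr.map pvFirst).toFinset ∪ vis.toFinset := by
    ext c
    simp only [List.mem_toFinset, Finset.mem_union, hkeys c]
  have hVsub : vis.toFinset ⊆ gf.keys.toFinset := by
    intro c hc
    rw [List.mem_toFinset] at hc ⊢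
    exact (hkeys c).mpr (Or.inr hc)
  -- A's check says: every source is visited
  have hAiff : (vis.length = gf.size) ↔ (arr.map pvFirst).toFinset ⊆ vis.toFinset := by
    rw [hsize, ← hvcard, ← hkcard]
    constructor
    · intro h
      have heq : vis.toFinset = gf.keys.toFinset :=
        Finset.eq_of_subset_of_card_le hVsub (le_of_eq h.symm)
      intro c hc
      have hcK : c ∈ gf.keys.toFinset := by
        rw [hKF]
        exact Finset.mem_union_left _ hc
      rw [← heq] at hcK
      exact hcK
    · intro h
      have : gf.keys.toFinset = vis.toFinset := by
        rw [hKF]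
        exact Finset.union_eq_right.mpr h
      rw [this]
  -- B's check says the same thing through seen
  have hBiff : ((PySem.Dict.counter (arr.map pvFirst)).keys.all
      (fun c => PySem.Set.contains seen c) = true)
      ↔ (arr.map pvFirst).toFinset ⊆ vis.toFinset := by
    rw [PySem.Dict.keys_counter, List.all_eq_true]
    constructor
    · intro h c hc
      rw [List.mem_toFinset] at hc ⊢
      have := h c ((PySem.Set.mem_ofList _ c).mpr hc)
      exact (hmem c).mpr ((PySem.Set.contains_iff seen c).mp this)
    · intro h c hc
      have hc' : c ∈ arr.map pvFirst := (PySem.Set.mem_ofList _ c).mp hc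
      have : c ∈ vis.toFinset := h (List.mem_toFinset.mpr hc')
      exact (PySem.Set.contains_iff seen c).mpr ((hmem c).mp (List.mem_toFinset.mp this))
  rw [hAiff, hBiff]

-- ===== VERDICT (by name: the statement is the Claim_ definition above) =====
theorem isCircle_spec : Claim_equal_isCircle := by
  intro arr hdom hpre
  obtain ⟨hne, hnem⟩ := hpre
  unfold Spec_isCircle
  cases arr with
  | nil => exact absurd rfl hne
  | cons s rest =>
    simp only [isCircle, isCircle_alt]
    rw [pvFold3]
    have hindeg : (s :: rest).foldl (fun d t => d.modify (pvLast t) 0 (· + 1)) PySem.Dict.empty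
        = PySem.Dict.counter ((s :: rest).map pvLast) := by
      rw [PySem.Dict.counter_eq_foldl, List.foldl_map]
    have houtdeg : (s :: rest).foldl (fun d t => d.modify (pvFirst t) 0 (· + 1)) PySem.Dict.empty
        = PySem.Dict.counter ((s :: rest).map pvFirst) := by
      rw [PySem.Dict.counter_eq_foldl, List.foldl_map]
    rw [hindeg, houtdeg]
    by_cases hctr : pvCtrEq (PySem.Dict.counter ((s :: rest).map pvLast))
        (PySem.Dict.counter ((s :: rest).map pvFirst)) = true
    · rw [hctr]
      simp only [Bool.not_true, Bool.false_eq_true, if_false]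
      have hiff := pvChecks (s :: rest) s rest rfl
      by_cases hchk : ((PySem.Dict.counter ((s :: rest).map pvFirst)).keys.all
          (fun c => PySem.Set.contains (pvLoopB ((s :: rest).length + 1) (s :: rest)
            (PySem.Set.ofList [pvFirst s])) c) = true)
      · rw [if_pos hchk, if_neg]
        intro hne2
        exact hne2 (hiff.mpr hchk)
      · rw [if_neg hchk, if_pos]
        intro heq
        exact hchk (hiff.mp heq)
    · have hctr' : pvCtrEq (PySem.Dict.counter ((s :: rest).map pvLast))
          (PySem.Dict.counter ((s :: rest).map pvFirst)) = false := by
        rcases Bool.eq_false_or_eq_true (pvCtrEq (PySem.Dict.counter ((s :: rest).map pvLast))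
          (PySem.Dict.counter ((s :: rest).map pvFirst))) with h | h
        · exact absurd h hctr
        · exact h
      rw [hctr']
      simp only [Bool.not_false, if_true]
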